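-- pv_equiv track=rewrite | github.com/qfzxhy/EventExtraction_system | event_extraction/trans_bio_to_norm.py | trans_bio
-- ===== SOURCE A (Python) =====
-- def trans_bio(data):
--     words = data[0].split()
--     label_types = ['TRIG','TERM']
--     es = data[1].replace('_',' ').replace(' ','').split('#')
--     ts = data[2].replace('_', ' ').replace(' ','').split('#')
--     elems = [es,ts]
--     bios = [[word,'O'] for word in words]
--
--     for e in es:
--         for i in range(len(words)):
--             for j in range(i+1,len(words)+1):
--                 if ''.join(words[i:j]) == e:
--                     for k in range(i,j):
--                         if k == i and (k == 0 or 'TERM' not in bios[k-1][1]):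
--                             bios[k][1] = 'B-'+label_types[1]
--                         else:
--                             bios[k][1] = 'I-'+label_types[1]
--                 if ''.join(words[i:j]) not in e:
--                     break
--     for t in ts:
--         for i in range(len(words)):
--             for j in range(i+1,len(words)+1):
--                 if ''.join(words[i:j]) == t:
--                     for k in range(i,j):
--                         if k == i and (k == 0 or 'TRIG' not in bios[k - 1][1]):
--                             bios[k][1] = 'B-'+label_types[0]
--                         else:
--                             bios[k][1] = 'I-'+label_types[0]
--                 if ''.join(words[i:j]) not in t:
--                     break
--
--     return bios
-- ===== SOURCE B (Python) =====
-- def trans_bio(data):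
--     words = data[0].split()
--     es = data[1].replace('_', ' ').replace(' ', '').split('#')
--     ts = data[2].replace('_', ' ').replace(' ', '').split('#')
--     bios = [[word, 'O'] for word in words]
--     n = len(words)
--     # span index: concatenated span text -> list of (i, j), i ascending then j ascending
--     spans = {}
--     for i in range(n):
--         s = ''
--         for j in range(i + 1, n + 1):
--             s += words[j - 1]
--             spans.setdefault(s, []).append((i, j))
--     for ents, lab, neighbor in ((es, 'TERM', 'TERM'), (ts, 'TRIG', 'TRIG')):
--         for e in ents:
--             for (i, j) in spans.get(e, []):
--                 for k in range(i, j):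
--                     if k == i and (k == 0 or neighbor not in bios[k - 1][1]):
--                         bios[k][1] = 'B-' + lab
--                     else:
--                         bios[k][1] = 'I-' + lab
--     return bios
-- ===== Notes on version B (the rewrite author's own statement) =====
-- stated objective: alternative
-- what changed: B builds a span index (concatenated span text -> list of (i,j) positions) once and processes each entity by direct dictionary lookup, instead of A's per-entity nested rescan over all word spans with a substring-based break; the B-/I- assignments happen in the same order as in A.
import Mathlib
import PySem

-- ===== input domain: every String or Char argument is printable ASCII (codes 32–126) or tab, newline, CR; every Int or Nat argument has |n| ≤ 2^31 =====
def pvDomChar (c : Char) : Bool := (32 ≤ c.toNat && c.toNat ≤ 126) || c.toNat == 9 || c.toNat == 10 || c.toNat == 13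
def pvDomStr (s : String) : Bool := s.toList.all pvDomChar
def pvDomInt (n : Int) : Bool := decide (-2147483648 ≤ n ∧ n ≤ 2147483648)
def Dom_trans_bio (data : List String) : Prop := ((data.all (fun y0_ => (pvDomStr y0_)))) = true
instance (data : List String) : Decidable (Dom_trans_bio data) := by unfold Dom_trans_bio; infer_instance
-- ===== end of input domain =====

-- B replaces A's per-entity nested rescan of all word spans by one span index (text -> list of (i,j))
-- built once, then direct lookups per entity; same B-/I- assignment in the same order (alternative algorithm, similar cost).

-- A-side helpers (B has its own copies below: the inner k-loop and the parsing are the same lines of Python in both)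
-- bios[k][1] = lab
def pvSetLabel (bios : List (List String)) (k : Nat) (lab : String) : List (List String) :=
  bios.modify k (fun r => r.set 1 lab)

-- bios[k-1][1] (rows are always 2-element lists; defaults are never reached on admitted inputs)
def pvGetLabel (bios : List (List String)) (k : Nat) : String :=
  (bios.getD k []).getD 1 ""

-- the inner `for k in range(i,j)` loop, identical in both Pythons
def pvApplySpan (neighbor lab : String) (i j : Nat) (bios : List (List String)) : List (List String) :=
  (List.range' i (j - i)).foldl (fun b k =>
    if k == i && (k == 0 || !(PySem.Str.isIn neighbor (pvGetLabel b (k - 1))))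
    then pvSetLabel b k ("B-" ++ lab) else pvSetLabel b k ("I-" ++ lab)) bios

-- data[x].replace('_',' ').replace(' ','').split('#')  (split? is some since "#" ≠ "")
def pvParseEnts (s : String) : List String :=
  (PySem.Str.split? (PySem.Str.replace (PySem.Str.replace s "_" " ") " " "") "#").getD []

-- ===== PORT A =====
-- ''.join(words[i:j])
def pvJoin (words : List String) (i j : Nat) : String :=
  PySem.Str.join "" (PySem.List.slice words (some (i : Int)) (some (j : Int)))

-- the j-loop with its break: `if ''.join(words[i:j]) == e: …; if ''.join(words[i:j]) not in e: break`
def pvJLoopA (words : List String) (e neighbor lab : String) (i : Nat) :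
    List Nat → List (List String) → List (List String)
  | [], bios => bios
  | j :: rest, bios =>
    let s := pvJoin words i j
    let b' := if s == e then pvApplySpan neighbor lab i j bios else bios
    if !(PySem.Str.isIn s e) then b' else pvJLoopA words e neighbor lab i rest b'

-- the i-loop for one entity
def pvILoopA (words : List String) (neighbor lab : String) (bios : List (List String)) (e : String) :
    List (List String) :=
  (List.range words.length).foldl
    (fun b i => pvJLoopA words e neighbor lab i (List.range' (i + 1) (words.length - i)) b) bios

def trans_bio (data : List String) : List (List String) :=
  match data with
  | d0 :: d1 :: d2 :: _ =>
    let words := PySem.Str.split₀ d0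
    let labelTypes := ["TRIG", "TERM"]
    let es := pvParseEnts d1
    let ts := pvParseEnts d2
    let bios0 := words.map (fun w => [w, "O"])
    let bios1 := es.foldl (fun b e => pvILoopA words "TERM" (labelTypes.getD 1 "") b e) bios0
    ts.foldl (fun b t => pvILoopA words "TRIG" (labelTypes.getD 0 "") b t) bios1
  | _ => []  -- data[0]/data[1]/data[2] raises IndexError: excluded by Pre_

-- ===== PORT B =====
-- B-side copies of the helpers (the corresponding Python lines are identical in Source B)
def pvSetLabelB (bios : List (List String)) (k : Nat) (lab : String) : List (List String) :=
  bios.modify k (fun r => r.set 1 lab)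

def pvGetLabelB (bios : List (List String)) (k : Nat) : String :=
  (bios.getD k []).getD 1 ""

def pvApplySpanB (neighbor lab : String) (i j : Nat) (bios : List (List String)) : List (List String) :=
  (List.range' i (j - i)).foldl (fun b k =>
    if k == i && (k == 0 || !(PySem.Str.isIn neighbor (pvGetLabelB b (k - 1))))
    then pvSetLabelB b k ("B-" ++ lab) else pvSetLabelB b k ("I-" ++ lab)) bios

def pvParseEntsB (s : String) : List String :=
  (PySem.Str.split? (PySem.Str.replace (PySem.Str.replace s "_" " ") " " "") "#").getD []

-- span index: concatenated text -> list of (i,j), i ascending then j ascending (s grown incrementally)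
def pvBuildSpans (words : List String) : PySem.Dict String (List (Nat × Nat)) :=
  (List.range words.length).foldl (fun d i =>
    ((List.range' (i + 1) (words.length - i)).foldl
      (fun (p : PySem.Dict String (List (Nat × Nat)) × String) j =>
        let s := p.2 ++ words.getD (j - 1) ""
        (p.1.insert s (p.1.getD s [] ++ [(i, j)]), s))
      (d, "")).1) PySem.Dict.empty

def pvProcessEnts (spans : PySem.Dict String (List (Nat × Nat))) (neighbor lab : String)
    (ents : List String) (bios : List (List String)) : List (List String) :=
  ents.foldl (fun b e => (spans.getD e []).foldl (fun b p => pvApplySpanB neighbor lab p.1 p.2 b) b) bios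

def trans_bio_alt (data : List String) : List (List String) :=
  match data with
  | [] => []
  | [_] => []
  | [_, _] => []
  | d0 :: d1 :: d2 :: _ =>
    let words := PySem.Str.split₀ d0
    let es := pvParseEntsB d1
    let ts := pvParseEntsB d2
    let bios0 := words.map (fun w => [w, "O"])
    let spans := pvBuildSpans words
    pvProcessEnts spans "TRIG" "TRIG" ts (pvProcessEnts spans "TERM" "TERM" es bios0)

-- ===== PRECONDITION & SPEC =====
-- A reads data[0], data[1], data[2]; on shorter lists it raises IndexError, so those are excluded.
def Pre_trans_bio (data : List String) : Prop := 3 ≤ data.length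
instance (data : List String) : Decidable (Pre_trans_bio data) := by unfold Pre_trans_bio; infer_instance
def pvWitness_trans_bio : List String := ["a b ab", "a_b", "b"]

def Spec_trans_bio (data : List String) (out : List (List String)) : Prop := out = trans_bio_alt data
instance (data : List String) (out : List (List String)) : Decidable (Spec_trans_bio data out) := by unfold Spec_trans_bio; infer_instance

-- ===== CLAIM (what is proved, stated in full; the proofs are below) =====
def Claim_equal_trans_bio : Prop := ∀ (data : List String), Dom_trans_bio data → Pre_trans_bio data → Spec_trans_bio data (trans_bio data)

-- ===== LEMMAS AND PROOFS =====

-- all (i,j) with ''.join(words[i:j]) == e, i ascending then j ascending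
def pvMatches (words : List String) (e : String) : List (Nat × Nat) :=
  (List.range words.length).flatMap (fun i =>
    ((List.range' (i + 1) (words.length - i)).filter (fun j => pvJoin words i j == e)).map (fun j => (i, j)))

theorem join_nil_flatten (l : List (List Char)) : PySem.Chars.join [] l = l.flatten := by
  show [].intercalate l = l.flatten
  unfold List.intercalate
  induction l with
  | nil => simp
  | cons a t ih =>
    cases t with
    | nil => simp
    | cons b t2 =>
      simp only [List.intersperse] at *
      simp_all

theorem pvJoin_toList (words : List String) (i j : Nat) :
    (pvJoin words i j).toList = (((words.drop i).take (j - i)).map String.toList).flatten := by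
  simp [pvJoin, PySem.Str.toList_join, PySem.List.slice_natCast, join_nil_flatten]

theorem pvJoin_prefix (words : List String) (i j j' : Nat) (h : j ≤ j') :
    (pvJoin words i j).toList <+: (pvJoin words i j').toList := by
  rw [pvJoin_toList, pvJoin_toList]
  obtain ⟨t, ht⟩ := List.take_prefix_take_left (l := words.drop i) (Nat.sub_le_sub_right h i)
  rw [← ht]
  simp

theorem pvJoin_self (words : List String) (i : Nat) : pvJoin words i i = "" := by
  apply String.toList_inj.mp
  simp [pvJoin_toList]

theorem pvJoin_succ (words : List String) (i j : Nat) (h : i ≤ j) :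
    pvJoin words i j ++ words.getD j "" = pvJoin words i (j + 1) := by
  apply String.toList_inj.mp
  rw [String.toList_append, pvJoin_toList, pvJoin_toList]
  rcases Nat.lt_or_ge j words.length with hj | hj
  · have h1 : j + 1 - i = (j - i) + 1 := by omega
    rw [h1, List.take_add_one]
    have h2 : (words.drop i)[j - i]? = some words[j] := by
      rw [List.getElem?_drop]
      have : i + (j - i) = j := by omega
      rw [this]
      exact List.getElem?_eq_getElem hj
    simp [h2, List.getD, List.getElem?_eq_getElem hj]
  · have h2 : words.getD j "" = "" := by
      simp [List.getD, List.getElem?_eq_none_iff.mpr hj]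
    rw [h2]
    have h3 : words.length - i ≤ j - i := by omega
    have h4 : words.length - i ≤ j + 1 - i := by omega
    rw [List.take_of_length_le (by simp; omega), List.take_of_length_le (by simp; omega)]
    simp

theorem pvJLoopA_cons (words : List String) (e nb lab : String) (i j : Nat)
    (rest : List Nat) (bios : List (List String)) :
    pvJLoopA words e nb lab i (j :: rest) bios =
      (if !(PySem.Str.isIn (pvJoin words i j) e)
       then (if pvJoin words i j == e then pvApplySpan nb lab i j bios else bios)
       else pvJLoopA words e nb lab i rest
              (if pvJoin words i j == e then pvApplySpan nb lab i j bios else bios)) := rfl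

theorem pvJLoopA_eq (words : List String) (e nb lab : String) (i : Nat) :
    ∀ (m a : Nat) (bios : List (List String)), i < a →
    pvJLoopA words e nb lab i (List.range' a m) bios =
      ((List.range' a m).filter (fun j => pvJoin words i j == e)).foldl
        (fun b j => pvApplySpan nb lab i j b) bios := by
  intro m
  induction m with
  | zero => intro a bios _; rfl
  | succ m ih =>
    intro a bios ha
    rw [List.range'_succ, pvJLoopA_cons, List.filter_cons]
    by_cases hin : PySem.Str.isIn (pvJoin words i a) e = true
    · -- no break this step
      rw [if_neg (by rw [Bool.not_eq_true', hin]; simp), ih (a + 1) _ (by omega)]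
      by_cases he : pvJoin words i a = e
      · simp [he]
      · simp [he]
    · -- break: pvJoin words i a is not a substring of e, hence no later j matches either
      have hne : ¬ (pvJoin words i a = e) := by
        intro h
        exact hin (by rw [PySem.Str.isIn_iff_infix, h])
      have hnolater : ∀ j ∈ List.range' (a + 1) m, ¬ (pvJoin words i j = e) := by
        intro j hj he
        have haj : a ≤ j := by have := List.mem_range'.mp hj; omega
        have hpre := pvJoin_prefix words i a j haj
        rw [he] at hpre
        exact hin ((PySem.Str.isIn_iff_infix _ _).mpr hpre.isInfix)
      have hf : PySem.Str.isIn (pvJoin words i a) e = false := by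
        cases h : PySem.Str.isIn (pvJoin words i a) e
        · rfl
        · exact absurd h hin
      rw [if_pos (by rw [Bool.not_eq_true', hf]), if_neg (by simp [hne]),
        if_neg (by simp [hne]),
        List.filter_eq_nil_iff.mpr (by intro j hj; simp [hnolater j hj])]
      rfl

theorem pvInner (words : List String) (i : Nat) (e : String) :
    ∀ (m a : Nat) (d : PySem.Dict String (List (Nat × Nat))) (s0 : String),
    i < a → s0 = pvJoin words i (a - 1) →
    (((List.range' a m).foldl
        (fun (p : PySem.Dict String (List (Nat × Nat)) × String) j =>
          let s := p.2 ++ words.getD (j - 1) ""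
          (p.1.insert s (p.1.getD s [] ++ [(i, j)]), s))
        (d, s0)).1.getD e []
      = d.getD e [] ++ ((List.range' a m).filter (fun j => pvJoin words i j == e)).map (fun j => (i, j)))
    ∧ ((List.range' a m).foldl
        (fun (p : PySem.Dict String (List (Nat × Nat)) × String) j =>
          let s := p.2 ++ words.getD (j - 1) ""
          (p.1.insert s (p.1.getD s [] ++ [(i, j)]), s))
        (d, s0)).2 = pvJoin words i (a - 1 + m) := by
  intro m
  induction m with
  | zero => intro a d s0 ha hs; simpa using hs
  | succ m ih =>
    intro a d s0 ha hs
    have hstep : s0 ++ words.getD (a - 1) "" = pvJoin words i a := by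
      rw [hs]
      have := pvJoin_succ words i (a - 1) (by omega)
      rwa [show a - 1 + 1 = a by omega] at this
    rw [List.range'_succ, List.foldl_cons, List.filter_cons]
    simp only [hstep]
    obtain ⟨ih1, ih2⟩ := ih (a + 1)
      (d.insert (pvJoin words i a) (d.getD (pvJoin words i a) [] ++ [(i, a)]))
      (pvJoin words i a) (by omega) (by simp)
    constructor
    · rw [ih1, PySem.Dict.getD_insert]
      by_cases he : e = pvJoin words i a
      · rw [if_pos he, if_pos (by simp [he.symm])]
        simp [he]
      · rw [if_neg he, if_neg (by simp; exact fun h => he h.symm)]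
    · rw [ih2]
      congr 1
      omega

theorem pvOuter (words : List String) (e : String) :
    ∀ (l : List Nat) (d : PySem.Dict String (List (Nat × Nat))),
    ((l.foldl (fun d i =>
        ((List.range' (i + 1) (words.length - i)).foldl
          (fun (p : PySem.Dict String (List (Nat × Nat)) × String) j =>
            let s := p.2 ++ words.getD (j - 1) ""
            (p.1.insert s (p.1.getD s [] ++ [(i, j)]), s))
          (d, "")).1) d).getD e [])
      = d.getD e [] ++ l.flatMap (fun i =>
          ((List.range' (i + 1) (words.length - i)).filter (fun j => pvJoin words i j == e)).map (fun j => (i, j))) := by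
  intro l
  induction l with
  | nil => intro d; simp
  | cons i t ih =>
    intro d
    rw [List.foldl_cons, ih, List.flatMap_cons, ← List.append_assoc]
    congr 1
    exact (pvInner words i e (words.length - i) (i + 1) d "" (by omega) (by simp [pvJoin_self])).1

theorem pvBuildSpans_getD (words : List String) (e : String) :
    (pvBuildSpans words).getD e [] = pvMatches words e := by
  rw [pvBuildSpans, pvMatches, pvOuter]
  simp [pysem]

theorem pvILoopA_eq (words : List String) (nb lab : String) (bios : List (List String)) (e : String) :
    pvILoopA words nb lab bios e =
      (pvMatches words e).foldl (fun b p => pvApplySpan nb lab p.1 p.2 b) bios := by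
  rw [pvILoopA, pvMatches, List.foldl_flatMap]
  apply PySem.List.foldl_congr_mem
  intro acc i _
  rw [pvJLoopA_eq words e nb lab i (words.length - i) (i + 1) acc (by omega), List.foldl_map]

theorem pvProcessEnts_eq (words : List String) (nb lab : String) (ents : List String)
    (bios : List (List String)) :
    pvProcessEnts (pvBuildSpans words) nb lab ents bios =
      ents.foldl (fun b e => pvILoopA words nb lab b e) bios := by
  rw [pvProcessEnts]
  apply PySem.List.foldl_congr_mem
  intro acc e _
  rw [pvBuildSpans_getD, pvILoopA_eq]
  rfl

theorem trans_bio_spec : Claim_equal_trans_bio := by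
  intro data _ hpre
  unfold Spec_trans_bio
  match data with
  | d0 :: d1 :: d2 :: _ =>
    simp only [trans_bio, trans_bio_alt, List.getD]
    rw [pvProcessEnts_eq, pvProcessEnts_eq]
    rfl
  | [] => simp [Pre_trans_bio] at hpre
  | [_] => simp [Pre_trans_bio] at hpre
  | [_, _] => simp [Pre_trans_bio] at hpre
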